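-- pv_equiv track=rewrite | github.com/wam730/Eternity-Python | The assignment of textbook/7.1 返回最长数字字串/_7.1_返回最长数字字串.py | longgestNumber
-- ===== SOURCE A (Python) =====
-- import string
--
-- def longgestNumber(st):
--     data = []
--     r = [0]*len(st)
--     for i in range(len(st)):
--         if st[i] in string.digits:
--             for j in range(i,len(st)):
--                 s = st[i:j+1:1]
--                 if s.isdigit():
--                     data.append(s)
--         elif st[i] not in string.digits:
--             r[i] = 1
--     if all(r):
--         return 'There are no numbers in it!'
--     else:
--         return max(data,key=len)
-- ===== SOURCE B (Python) =====
-- def longgestNumber(st):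
--     best = ''
--     cur = ''
--     found = False
--     for ch in st:
--         if '0' <= ch <= '9':
--             found = True
--             cur += ch
--             if len(cur) > len(best):
--                 best = cur
--         else:
--             cur = ''
--     return best if found else 'There are no numbers in it!'
-- ===== Notes on version B (the rewrite author's own statement) =====
-- stated objective: faster
-- what changed: replaced the O(n^3) enumerate-all-digit-substrings-then-max(key=len) algorithm by a single linear scan that tracks the current digit run and keeps the first longest
import Mathlib
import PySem

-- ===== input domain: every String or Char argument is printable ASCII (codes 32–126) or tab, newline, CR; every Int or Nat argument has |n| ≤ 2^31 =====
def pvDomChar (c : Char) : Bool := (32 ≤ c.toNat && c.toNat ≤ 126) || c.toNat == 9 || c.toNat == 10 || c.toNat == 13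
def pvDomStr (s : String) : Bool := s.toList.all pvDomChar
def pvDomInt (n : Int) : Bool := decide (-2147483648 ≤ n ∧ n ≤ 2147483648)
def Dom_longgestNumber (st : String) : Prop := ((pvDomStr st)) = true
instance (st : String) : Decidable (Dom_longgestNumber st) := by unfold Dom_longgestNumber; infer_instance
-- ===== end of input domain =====

-- B replaces A's O(n^3) enumerate-all-digit-substrings-then-max(key=len) loop by one linear
-- scan tracking the current digit run and keeping the first longest (objective: faster).

-- ===== PORT A =====

-- string.digits
def pvStringDigits : List Char := ['0', '1', '2', '3', '4', '5', '6', '7', '8', '9']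

-- the inner `for j in range(i, len(st)):` loop of A, appending every digit slice st[i:j+1:1]
def pvInnerA (l : List Char) (n i : Int) (data : List (List Char)) : List (List Char) :=
  (PySem.List.pyRange i n).foldl (fun data j =>
    -- st[i:j+1:1] : a slice with the literal step 1, i.e. the plain slice st[i:j+1]
    let s := PySem.List.slice l (some i) (some (j + 1))
    if PySem.Chars.strIsdigit s then data ++ [s] else data) data

-- one iteration of A's outer `for i in range(len(st)):` loop, acting on the pair (data, r)
def pvStepA (l : List Char) (n : Int) (acc : List (List Char) × List Int) (i : Int) :
    List (List Char) × List Int :=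
  -- st[i] in string.digits : i is drawn from range(len(st)), so st[i] never raises
  if pvStringDigits.contains ((PySem.List.pyGet? l i).getD ' ')
  then (pvInnerA l n i acc.1, acc.2)
  else (acc.1, acc.2.set i.toNat 1)   -- r[i] = 1 ; here 0 ≤ i < len(r)

def longgestNumber (st : String) : String :=
  let l := st.toList
  let n : Int := PySem.Chars.len l
  let res := (PySem.List.pyRange 0 n).foldl (pvStepA l n) ([], List.replicate l.length (0 : Int))
  if res.2.all (fun x => x != 0) then "There are no numbers in it!"
  else
    match PySem.List.max? res.1 PySem.Chars.len with   -- max(data, key=len)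
    | some s => String.ofList s
    | none => ""   -- unreachable: data is nonempty whenever some r[i] = 0

-- ===== PORT B =====

-- one step of B's scan; the state is (best, cur, found)
def pvStepB (acc : List Char × List Char × Bool) (ch : Char) : List Char × List Char × Bool :=
  if '0' ≤ ch ∧ ch ≤ '9' then
    let cur := acc.2.1 ++ [ch]
    (if acc.1.length < cur.length then cur else acc.1, cur, true)
  else (acc.1, [], acc.2.2)

def longgestNumber_alt (st : String) : String :=
  let res := st.toList.foldl pvStepB ([], [], false)
  if res.2.2 then String.ofList res.1 else "There are no numbers in it!"

-- ===== PRECONDITION & SPEC =====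
def Spec_longgestNumber (st : String) (out : String) : Prop := out = longgestNumber_alt st
instance (st : String) (out : String) : Decidable (Spec_longgestNumber st out) := by unfold Spec_longgestNumber; infer_instance

-- ===== CLAIM (what is proved, stated in full; the proofs are below) =====
def Claim_equal_longgestNumber : Prop := ∀ (st : String), Dom_longgestNumber st → Spec_longgestNumber st (longgestNumber st)

-- ===== LEMMAS AND PROOFS =====

-- maximal digit runs of a string, left to right
def pvRuns : List Char → List (List Char)
  | [] => []
  | c :: t =>
    if PySem.Chars.isdigit c
    then (c :: t.takeWhile PySem.Chars.isdigit) :: pvRuns (t.dropWhile PySem.Chars.isdigit)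
    else pvRuns t
termination_by l => l.length
decreasing_by
  · have := List.length_dropWhile_le PySem.Chars.isdigit t
    simp; omega
  · simp

-- "keep the first longest" combining step shared by both characterisations
def pvMaxStep (b r : List Char) : List Char := if b.length < r.length then r else b

-- length of the digit run starting at the head of u
def pvLi (u : List Char) : Nat := (u.takeWhile PySem.Chars.isdigit).length

-- the nonempty prefixes of u of length ≤ L, shortest first
def pvPrefs (u : List Char) (L : Nat) : List (List Char) := (List.range L).map (fun m => u.take (m + 1))

-- what A's outer-loop index i appends to data
def pvContrib (l : List Char) (i : Nat) : List (List Char) :=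
  if PySem.Chars.isdigit (l[i]?.getD ' ') then pvPrefs (l.drop i) (pvLi (l.drop i)) else []

-- A's finished data list
def pvData (l : List Char) : List (List Char) := (List.range l.length).flatMap (pvContrib l)

-- all nonempty contiguous substrings of r, by start index then length
def pvSubs (r : List Char) : List (List Char) :=
  (List.range r.length).flatMap (fun k => pvPrefs (r.drop k) (r.length - k))

-- A's finished r list
def pvRFinal (l : List Char) : List Int :=
  (List.range l.length).foldl
    (fun r i => if PySem.Chars.isdigit (l[i]?.getD ' ') then r else r.set i 1)
    (List.replicate l.length (0 : Int))

theorem pv_isdigit_iff (c : Char) : PySem.Chars.isdigit c = true ↔ ('0' ≤ c ∧ c ≤ '9') := by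
  simp [PySem.Chars.isdigit]

theorem pv_contains_eq_isdigit (c : Char) :
    pvStringDigits.contains c = PySem.Chars.isdigit c := by
  have inj : ∀ d : Char, c.toNat = d.toNat → c = d := by
    intro d h; apply Char.ext; exact UInt32.toNat_inj.mp h
  have key : (c ∈ pvStringDigits) ↔ ('0' ≤ c ∧ c ≤ '9') := by
    constructor
    · intro h; fin_cases h <;> exact ⟨by decide, by decide⟩
    · rintro ⟨h1, h2⟩
      have n1 : 48 ≤ c.toNat := h1
      have n2 : c.toNat ≤ 57 := h2
      have hd : c.toNat = 48 ∨ c.toNat = 49 ∨ c.toNat = 50 ∨ c.toNat = 51 ∨ c.toNat = 52 ∨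
             c.toNat = 53 ∨ c.toNat = 54 ∨ c.toNat = 55 ∨ c.toNat = 56 ∨ c.toNat = 57 := by omega
      rcases hd with h|h|h|h|h|h|h|h|h|h
      · simp [pvStringDigits, inj '0' (by rw [h]; rfl)]
      · simp [pvStringDigits, inj '1' (by rw [h]; rfl)]
      · simp [pvStringDigits, inj '2' (by rw [h]; rfl)]
      · simp [pvStringDigits, inj '3' (by rw [h]; rfl)]
      · simp [pvStringDigits, inj '4' (by rw [h]; rfl)]
      · simp [pvStringDigits, inj '5' (by rw [h]; rfl)]
      · simp [pvStringDigits, inj '6' (by rw [h]; rfl)]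
      · simp [pvStringDigits, inj '7' (by rw [h]; rfl)]
      · simp [pvStringDigits, inj '8' (by rw [h]; rfl)]
      · simp [pvStringDigits, inj '9' (by rw [h]; rfl)]
  simp only [List.contains, List.elem_eq_mem, PySem.Chars.isdigit]
  rw [Bool.eq_iff_iff]
  simp [key]

theorem pv_stepB_digit (acc : List Char × List Char × Bool) (ch : Char)
    (h : PySem.Chars.isdigit ch = true) :
    pvStepB acc ch =
      (if acc.1.length < acc.2.1.length + 1 then acc.2.1 ++ [ch] else acc.1,
        acc.2.1 ++ [ch], true) := by
  rw [pvStepB, if_pos ((pv_isdigit_iff ch).mp h)]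
  simp

theorem pv_stepB_nondigit (acc : List Char × List Char × Bool) (ch : Char)
    (h : PySem.Chars.isdigit ch = false) :
    pvStepB acc ch = (acc.1, [], acc.2.2) := by
  rw [pvStepB, if_neg]
  intro hc
  rw [(pv_isdigit_iff ch).mpr hc] at h
  exact Bool.noConfusion h

theorem pv_foldB_digits (run : List Char) (hrun : run.all PySem.Chars.isdigit = true) :
    ∀ (best cur : List Char) (f : Bool), cur.length ≤ best.length →
      List.foldl pvStepB (best, cur, f) run =
        ((if best.length < cur.length + run.length then cur ++ run else best),
          cur ++ run, f || !run.isEmpty) := by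
  induction run with
  | nil => intro best cur f hcb; simp; omega
  | cons c rest ih =>
    intro best cur f hcb
    simp only [List.all_cons, Bool.and_eq_true] at hrun
    rw [List.foldl_cons, pv_stepB_digit _ _ hrun.1]
    by_cases hb : best.length < cur.length + 1
    · rw [if_pos hb]
      rw [ih hrun.2 (cur ++ [c]) (cur ++ [c]) true (by simp)]
      have hbl : best.length = cur.length := by omega
      simp only [List.length_append, List.length_cons]
      rcases Nat.eq_zero_or_pos rest.length with h0 | h0
      · have : rest = [] := List.length_eq_zero_iff.mp h0
        subst this
        simp [hbl]
      · have hne : rest.isEmpty = false := by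
          cases rest; simp at h0; simp
        rw [if_pos (by simp; omega), if_pos (by omega)]
        simp [hne]
    · rw [if_neg hb]
      rw [ih hrun.2 best (cur ++ [c]) true (by simp; omega)]
      have he : cur ++ [c] ++ rest = cur ++ c :: rest := by simp
      refine congrArg₂ Prod.mk ?_ ?_
      · rw [he]
        refine if_congr ?_ rfl rfl
        simp; omega
      · exact congrArg₂ Prod.mk he (by simp)

theorem pv_dropWhile_head {p : Char → Bool} {t : List Char} {x : Char} {d : List Char}
    (h : t.dropWhile p = x :: d) : p x = false := by
  have := List.head?_dropWhile_not p t
  rw [h] at this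
  simpa using this

theorem pv_runs_nil : pvRuns ([] : List Char) = [] := by rw [pvRuns]

theorem pv_runs_cons_digit (c : Char) (t : List Char) (h : PySem.Chars.isdigit c = true) :
    pvRuns (c :: t) = (c :: t.takeWhile PySem.Chars.isdigit) :: pvRuns (t.dropWhile PySem.Chars.isdigit) := by
  rw [pvRuns, if_pos h]

theorem pv_runs_cons_nondigit (c : Char) (t : List Char) (h : PySem.Chars.isdigit c = false) :
    pvRuns (c :: t) = pvRuns t := by
  rw [pvRuns, if_neg (by simp [h])]

theorem pv_foldB_runs (l : List Char) :
    ∀ (best : List Char) (f : Bool), ∃ cur,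
      List.foldl pvStepB (best, [], f) l =
        (List.foldl pvMaxStep best (pvRuns l), cur, f || !(pvRuns l).isEmpty) := by
  induction l using pvRuns.induct with
  | case1 => intro best f; exact ⟨[], by simp [pv_runs_nil]⟩
  | case2 c t hdig ih =>
    intro best f
    have hsplit : c :: t = (c :: t.takeWhile PySem.Chars.isdigit) ++ t.dropWhile PySem.Chars.isdigit := by
      simp [List.takeWhile_append_dropWhile]
    have hrall : (c :: t.takeWhile PySem.Chars.isdigit).all PySem.Chars.isdigit = true := by
      simp [hdig, List.all_takeWhile]
    have hfold1 : List.foldl pvStepB (best, [], f) (c :: t) =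
        List.foldl pvStepB (pvMaxStep best (c :: t.takeWhile PySem.Chars.isdigit),
          c :: t.takeWhile PySem.Chars.isdigit, true) (t.dropWhile PySem.Chars.isdigit) := by
      conv_lhs => rw [hsplit]
      rw [List.foldl_append, pv_foldB_digits _ hrall best [] f (by simp)]
      simp [pvMaxStep]
    rw [pv_runs_cons_digit c t hdig]
    cases hde : t.dropWhile PySem.Chars.isdigit with
    | nil =>
      refine ⟨c :: t.takeWhile PySem.Chars.isdigit, ?_⟩
      rw [hfold1, hde]
      simp [pv_runs_nil]
    | cons x d' =>
      have hx : PySem.Chars.isdigit x = false := pv_dropWhile_head hde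
      obtain ⟨cur, hcur⟩ := ih (pvMaxStep best (c :: t.takeWhile PySem.Chars.isdigit)) true
      rw [hde, List.foldl_cons, pv_stepB_nondigit _ _ hx] at hcur
      refine ⟨cur, ?_⟩
      rw [hfold1, hde, List.foldl_cons, pv_stepB_nondigit _ _ hx, hcur]
      simp
  | case3 c t hdig ih =>
    intro best f
    have hdig' : PySem.Chars.isdigit c = false := by simpa using hdig
    obtain ⟨cur, hcur⟩ := ih best f
    refine ⟨cur, ?_⟩
    rw [List.foldl_cons, pv_stepB_nondigit _ _ hdig', hcur, pv_runs_cons_nondigit c t hdig']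

theorem pv_runs_nil_iff (l : List Char) :
    pvRuns l = [] ↔ l.all (fun c => !PySem.Chars.isdigit c) = true := by
  induction l using pvRuns.induct with
  | case1 => simp [pv_runs_nil]
  | case2 c t hdig ih => simp [pv_runs_cons_digit c t hdig, hdig]
  | case3 c t hdig ih =>
    have hdig' : PySem.Chars.isdigit c = false := by simpa using hdig
    simp [pv_runs_cons_nondigit c t hdig', hdig', ih]

theorem pv_runs_ne_nil (l : List Char) : ∀ r ∈ pvRuns l, r ≠ [] := by
  induction l using pvRuns.induct with
  | case1 => simp [pv_runs_nil]
  | case2 c t hdig ih =>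
    rw [pv_runs_cons_digit c t hdig]
    intro r hr
    rcases List.mem_cons.mp hr with h | h
    · subst h; simp
    · exact ih r h
  | case3 c t hdig ih =>
    have hdig' : PySem.Chars.isdigit c = false := by simpa using hdig
    rw [pv_runs_cons_nondigit c t hdig']; exact ih

theorem pv_filter_lt_range (m n : Nat) (h : m ≤ n) :
    (List.range n).filter (fun k => decide (k < m)) = List.range m := by
  induction n with
  | zero => have : m = 0 := by omega
            simp [this]
  | succ n ih =>
    rw [List.range_succ, List.filter_append]
    rcases Nat.lt_or_ge n m with h2 | h2
    · have hm : m = n + 1 := by omega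
      subst hm
      have e1 : (List.range n).filter (fun k => decide (k < n + 1)) = List.range n := by
        rw [List.filter_eq_self]; intro a ha; simp at ha ⊢; omega
      rw [e1]
      simp [List.range_succ]
    · rw [ih h2]
      have e2 : List.filter (fun k => decide (k < m)) [n] = [] := by simp; omega
      rw [e2, List.append_nil]

theorem pv_li_le (u : List Char) : pvLi u ≤ u.length := by
  have h := List.IsPrefix.length_le (List.takeWhile_prefix (p := PySem.Chars.isdigit) (l := u))
  simpa [pvLi] using h

theorem pv_li_cons (c : Char) (u : List Char) :
    pvLi (c :: u) = if PySem.Chars.isdigit c then pvLi u + 1 else 0 := by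
  by_cases h : PySem.Chars.isdigit c <;> simp [pvLi, h]

theorem pv_all_take_iff (u : List Char) : ∀ (t : Nat), 0 < t → t ≤ u.length →
    ((u.take t).all PySem.Chars.isdigit = true ↔ t ≤ pvLi u) := by
  induction u with
  | nil => intro t ht hle; simp at hle; omega
  | cons c u' ih =>
    intro t ht hle
    obtain ⟨t', rfl⟩ : ∃ t', t = t' + 1 := ⟨t - 1, by omega⟩
    rw [List.take_succ_cons, List.all_cons, pv_li_cons]
    by_cases hc : PySem.Chars.isdigit c
    · rw [if_pos hc]
      rcases Nat.eq_zero_or_pos t' with h0 | h0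
      · subst h0; simp [hc]
      · have := ih t' h0 (by simpa using hle)
        simp only [hc, Bool.true_and, this]
        omega
    · simp [hc]

theorem pv_innerA_eq (l : List Char) (i : Nat) (hi : i < l.length) (data : List (List Char)) :
    pvInnerA l (l.length : Int) (i : Int) data = data ++ pvPrefs (l.drop i) (pvLi (l.drop i)) := by
  unfold pvInnerA
  rw [PySem.List.pyRange_of_pos _ _ (by norm_num : (0:Int) < 1)]
  rw [if_pos (by exact_mod_cast hi)]
  have hcnt : ((((l.length : Int) - i + 1 - 1)) / 1).toNat = l.length - i := by
    rw [Int.ediv_one]; omega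
  rw [hcnt, List.foldl_map]
  have hstep : ∀ (data : List (List Char)), ∀ k ∈ List.range (l.length - i),
      (let s := PySem.List.slice l (some (i : Int)) (some ((i : Int) + 1 * (k : Int) + 1));
        if PySem.Chars.strIsdigit s then data ++ [s] else data) =
      (if decide (k < pvLi (l.drop i)) = true
        then data ++ [(l.drop i).take (k + 1)] else data) := by
    intro data k hk
    rw [List.mem_range] at hk
    have hcast : (i : Int) + 1 * (k : Int) + 1 = ((i + k + 1 : Nat) : Int) := by push_cast; ring
    rw [hcast]
    have hslice : PySem.List.slice l (some (i : Int)) (some ((i + k + 1 : Nat) : Int)) =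
        (l.drop i).take (k + 1) := by
      rw [PySem.List.slice_natCast]
      congr 1
      omega
    simp only [hslice]
    have hne : ((l.drop i).take (k + 1)).isEmpty = false := by
      rw [List.isEmpty_eq_false_iff, ← List.length_pos_iff, List.length_take, List.length_drop]
      omega
    have hcond : PySem.Chars.strIsdigit ((l.drop i).take (k + 1)) =
        decide (k < pvLi (l.drop i)) := by
      rw [PySem.Chars.strIsdigit, hne]
      rw [Bool.eq_iff_iff]
      have := pv_all_take_iff (l.drop i) (k + 1) (by omega) (by rw [List.length_drop]; omega)
      simp only [Bool.not_false, Bool.true_and, this, decide_eq_true_eq]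
      omega
    rw [hcond]
  rw [PySem.List.foldl_congr_mem _ _ _ _ hstep]
  rw [PySem.List.foldl_append_if]
  rw [pv_filter_lt_range _ _ (by have := pv_li_le (l.drop i); rw [List.length_drop] at this; omega)]
  rfl

theorem pv_stepA_eq (l : List Char) (acc : List (List Char) × List Int) (i : Nat)
    (hi : i < l.length) :
    pvStepA l (l.length : Int) acc (i : Int) =
      (acc.1 ++ pvContrib l i,
        if PySem.Chars.isdigit (l[i]?.getD ' ') then acc.2 else acc.2.set i 1) := by
  unfold pvStepA
  rw [PySem.List.pyGet?_natCast, pv_contains_eq_isdigit]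
  by_cases h : PySem.Chars.isdigit (l[i]?.getD ' ')
  · rw [if_pos h, if_pos h, pv_innerA_eq l i hi, pvContrib, if_pos h]
  · rw [if_neg h, if_neg h, pvContrib, if_neg h, List.append_nil]
    simp

theorem pv_outerA (l : List Char) :
    (PySem.List.pyRange 0 (PySem.Chars.len l)).foldl (pvStepA l (PySem.Chars.len l))
      ([], List.replicate l.length (0 : Int)) = (pvData l, pvRFinal l) := by
  have hlen : PySem.Chars.len l = (l.length : Int) := by simp [PySem.Chars.len]
  rw [hlen, PySem.List.pyRange_zero_natCast, List.foldl_map]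
  have hstep : ∀ (acc : List (List Char) × List Int), ∀ i ∈ List.range l.length,
      pvStepA l (l.length : Int) acc (i : Int) =
      (acc.1 ++ pvContrib l i,
        if PySem.Chars.isdigit (l[i]?.getD ' ') then acc.2 else acc.2.set i 1) := by
    intro acc i hi
    rw [List.mem_range] at hi
    exact pv_stepA_eq l acc i hi
  rw [PySem.List.foldl_congr_mem _ _ _ _ hstep]
  have key := PySem.List.foldl_prod_mk (fun d (i : Nat) => d ++ pvContrib l i)
    (fun r (i : Nat) => if PySem.Chars.isdigit (l[i]?.getD ' ') then r else r.set i 1)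
    (List.range l.length) [] (List.replicate l.length (0 : Int))
  simp only at key
  rw [key, PySem.List.foldl_append_eq_flatMap]
  rfl

theorem pv_rfold_len (l : List Char) (idxs : List Nat) : ∀ (r : List Int),
    (idxs.foldl (fun r i => if PySem.Chars.isdigit (l[i]?.getD ' ') then r else r.set i 1) r).length
      = r.length := by
  induction idxs with
  | nil => intro r; rfl
  | cons i rest ih =>
    intro r
    rw [List.foldl_cons, ih]
    by_cases h : PySem.Chars.isdigit (l[i]?.getD ' ') <;> simp [h]

theorem pv_rfold_get (l : List Char) (idxs : List Nat) : ∀ (r : List Int) (j : Nat),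
    j < r.length →
    (idxs.foldl (fun r i => if PySem.Chars.isdigit (l[i]?.getD ' ') then r else r.set i 1) r)[j]? =
      if j ∈ idxs ∧ PySem.Chars.isdigit (l[j]?.getD ' ') = false then some 1 else r[j]? := by
  induction idxs with
  | nil => intro r j hj; simp
  | cons i rest ih =>
    intro r j hj
    rw [List.foldl_cons]
    have hlen : (if PySem.Chars.isdigit (l[i]?.getD ' ') then r else r.set i 1).length = r.length := by
      by_cases h : PySem.Chars.isdigit (l[i]?.getD ' ') <;> simp [h]
    rw [ih _ j (by omega)]
    by_cases h1 : j ∈ rest ∧ PySem.Chars.isdigit (l[j]?.getD ' ') = false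
    · rw [if_pos h1, if_pos ⟨List.mem_cons_of_mem i h1.1, h1.2⟩]
    · rw [if_neg h1]
      by_cases h2 : PySem.Chars.isdigit (l[j]?.getD ' ') = false ∧ i = j
      · obtain ⟨hdig, rfl⟩ := h2
        rw [if_neg (by rw [hdig]; simp), List.getElem?_set, if_pos rfl, if_pos hj]
        rw [if_pos ⟨List.mem_cons_self, hdig⟩]
      · have hrhs : ¬ (j ∈ i :: rest ∧ PySem.Chars.isdigit (l[j]?.getD ' ') = false) := by
          rintro ⟨hm, hdig⟩
          rcases List.mem_cons.mp hm with rfl | hm'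
          · exact h2 ⟨hdig, rfl⟩
          · exact h1 ⟨hm', hdig⟩
        rw [if_neg hrhs]
        by_cases hd : PySem.Chars.isdigit (l[i]?.getD ' ')
        · rw [if_pos hd]
        · rw [if_neg hd, List.getElem?_set]
          have hij : i ≠ j := by
            intro rfl'
            subst rfl'
            exact h2 ⟨by simpa using hd, rfl⟩
          rw [if_neg hij]

theorem pv_rfinal_len (l : List Char) : (pvRFinal l).length = l.length := by
  rw [pvRFinal, pv_rfold_len]
  simp

theorem pv_rall (l : List Char) :
    (pvRFinal l).all (fun x => x != 0) = l.all (fun c => !PySem.Chars.isdigit c) := by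
  rw [Bool.eq_iff_iff, List.all_eq_true, List.all_eq_true]
  have hget : ∀ j, j < l.length →
      (pvRFinal l)[j]? = if PySem.Chars.isdigit (l[j]?.getD ' ') then some 0 else some 1 := by
    intro j hj
    rw [pvRFinal, pv_rfold_get l _ _ j (by simp; omega)]
    by_cases h : PySem.Chars.isdigit (l[j]?.getD ' ')
    · rw [if_neg (by simp [h]), List.getElem?_replicate, if_pos hj, if_pos h]
    · rw [if_pos ⟨by simp [hj], by simpa using h⟩, if_neg h]
  constructor
  · intro hall c hc
    obtain ⟨j, hj, rfl⟩ := List.mem_iff_getElem.mp hc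
    have hjl : (l[j]?.getD ' ') = l[j] := by simp [List.getElem?_eq_getElem hj]
    by_cases h : PySem.Chars.isdigit l[j]
    · exfalso
      have hmem : (0 : Int) ∈ pvRFinal l := by
        have := hget j hj
        rw [hjl, if_pos h] at this
        exact List.mem_of_getElem? this
      have := hall 0 hmem
      simp at this
    · simp [h]
  · intro hall x hx
    obtain ⟨j, hj, rfl⟩ := List.mem_iff_getElem.mp hx
    have hjl : j < l.length := by have := pv_rfinal_len l; omega
    have hjv : (l[j]?.getD ' ') = l[j] := by simp [List.getElem?_eq_getElem hjl]
    have hdig : PySem.Chars.isdigit l[j] = false := by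
      have := hall l[j] (List.getElem_mem hjl)
      simpa using this
    have := hget j hjl
    rw [hjv, if_neg (by simp [hdig])] at this
    rw [List.getElem?_eq_getElem hj] at this
    simp at this
    simp [this]

theorem pv_takeWhile_all {p : Char → Bool} {l : List Char} (h : l.all p = true) :
    l.takeWhile p = l := by
  rw [List.takeWhile_eq_self_iff]
  exact fun x hx => List.all_eq_true.mp h x hx

theorem pv_contrib_append_left (r d : List Char) (hall : r.all PySem.Chars.isdigit = true)
    (hd : d = [] ∨ ∃ x d', d = x :: d' ∧ PySem.Chars.isdigit x = false)
    (k : Nat) (hk : k < r.length) :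
    pvContrib (r ++ d) k = pvPrefs (r.drop k) (r.length - k) := by
  have hgk : (r ++ d)[k]? = some r[k] := by
    rw [List.getElem?_append_left hk, List.getElem?_eq_getElem hk]
  have hdig : PySem.Chars.isdigit r[k] = true :=
    List.all_eq_true.mp hall _ (List.getElem_mem hk)
  have hdrop : (r ++ d).drop k = r.drop k ++ d := List.drop_append_of_le_length (by omega)
  have halld : (r.drop k).all PySem.Chars.isdigit = true := by
    rw [List.all_eq_true] at hall ⊢
    exact fun x hx => hall x (List.mem_of_mem_drop hx)
  have htwd : d.takeWhile PySem.Chars.isdigit = [] := by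
    rcases hd with rfl | ⟨x, d', rfl, hx⟩
    · rfl
    · simp [hx]
  have hLi : pvLi (r.drop k ++ d) = r.length - k := by
    rw [pvLi, List.takeWhile_append, if_pos (by rw [pv_takeWhile_all halld]), htwd,
      List.append_nil, List.length_drop]
  have hprefs : pvPrefs (r.drop k ++ d) (r.length - k) = pvPrefs (r.drop k) (r.length - k) := by
    rw [pvPrefs, pvPrefs]
    apply List.map_congr_left
    intro m hm
    rw [List.mem_range] at hm
    exact List.take_append_of_le_length (by rw [List.length_drop]; omega)
  rw [pvContrib, hgk, Option.getD_some, if_pos hdig, hdrop, hLi, hprefs]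

theorem pv_contrib_append_right (r d : List Char) (i : Nat) :
    pvContrib (r ++ d) (r.length + i) = pvContrib d i := by
  have h1 : (r ++ d)[r.length + i]? = d[i]? := by
    rw [List.getElem?_append_right (by omega)]
    congr 1
    omega
  have h2 : (r ++ d).drop (r.length + i) = d.drop i := List.drop_length_add_append i
  rw [pvContrib, pvContrib, h1, h2]

theorem pv_contrib_cons (c : Char) (t : List Char) (j : Nat) :
    pvContrib (c :: t) (j + 1) = pvContrib t j := by
  have : (c :: t) = [c] ++ t := rfl
  rw [this, show j + 1 = [c].length + j by simp [Nat.add_comm], pv_contrib_append_right]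

theorem pv_data_eq (l : List Char) : pvData l = (pvRuns l).flatMap pvSubs := by
  induction l using pvRuns.induct with
  | case1 => simp [pvData, pv_runs_nil]
  | case2 c t hdig ih =>
    have hsplit : c :: t = (c :: t.takeWhile PySem.Chars.isdigit) ++ t.dropWhile PySem.Chars.isdigit := by
      simp [List.takeWhile_append_dropWhile]
    have hall : (c :: t.takeWhile PySem.Chars.isdigit).all PySem.Chars.isdigit = true := by
      simp [hdig, List.all_takeWhile]
    have hd : t.dropWhile PySem.Chars.isdigit = [] ∨
        ∃ x d', t.dropWhile PySem.Chars.isdigit = x :: d' ∧ PySem.Chars.isdigit x = false := by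
      cases hde : t.dropWhile PySem.Chars.isdigit with
      | nil => exact Or.inl rfl
      | cons x d' => exact Or.inr ⟨x, d', rfl, pv_dropWhile_head hde⟩
    set r := c :: t.takeWhile PySem.Chars.isdigit with hr
    set d := t.dropWhile PySem.Chars.isdigit with hdd
    have hlen : (c :: t).length = r.length + d.length := by
      rw [hsplit]; simp
    rw [pvData, hlen, List.range_add, List.flatMap_append, List.flatMap_map]
    have part1 : (List.range r.length).flatMap (pvContrib (c :: t)) = pvSubs r := by
      rw [pvSubs]
      apply List.flatMap_congr
      intro k hk
      rw [List.mem_range] at hk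
      rw [hsplit]
      exact pv_contrib_append_left r d hall hd k hk
    have part2 : (List.range d.length).flatMap (fun a => pvContrib (c :: t) (r.length + a))
        = pvData d := by
      rw [pvData]
      apply List.flatMap_congr
      intro i hi
      rw [hsplit]
      exact pv_contrib_append_right r d i
    rw [part1, part2, ih, pv_runs_cons_digit c t hdig, List.flatMap_cons]
  | case3 c t hdig ih =>
    have hdig' : PySem.Chars.isdigit c = false := by simpa using hdig
    rw [pvData, List.length_cons, List.range_succ_eq_map, List.flatMap_cons, List.flatMap_map]
    have h0 : pvContrib (c :: t) 0 = [] := by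
      rw [pvContrib, if_neg]
      simp [hdig']
    have hsh : ∀ j, (pvContrib (c :: t) ∘ Nat.succ) j = pvContrib t j := by
      intro j
      simp only [Function.comp]
      exact pv_contrib_cons c t j
    rw [h0, List.nil_append]
    calc (List.range t.length).flatMap (pvContrib (c :: t) ∘ Nat.succ)
        = (List.range t.length).flatMap (pvContrib t) := by
          exact List.flatMap_congr (fun j _ => hsh j)
      _ = (pvRuns (c :: t)).flatMap pvSubs := by
          rw [← pvData, ih, pv_runs_cons_nondigit c t hdig']

theorem pv_fold_prefs (u : List Char) : ∀ (L : Nat), L ≤ u.length → ∀ (b : List Char),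
    List.foldl pvMaxStep b (pvPrefs u L) = if b.length < L then u.take L else b := by
  intro L
  induction L with
  | zero => intro hL b; simp [pvPrefs]
  | succ L ih =>
    intro hL b
    rw [pvPrefs, List.range_succ, List.map_append, List.foldl_append]
    rw [show (List.range L).map (fun m => u.take (m + 1)) = pvPrefs u L from rfl]
    rw [ih (by omega) b]
    have hlt : (u.take (L + 1)).length = L + 1 := by
      rw [List.length_take]; omega
    have hltL : (u.take L).length = L := by
      rw [List.length_take]; omega
    simp only [List.map_cons, List.map_nil, List.foldl_cons, List.foldl_nil]
    by_cases hb : b.length < L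
    · rw [if_pos hb, if_pos (by omega), pvMaxStep, if_pos (by omega)]
    · rw [if_neg hb, pvMaxStep, hlt]

theorem pv_fold_noop (xs : List (List Char)) : ∀ (b : List Char),
    (∀ x ∈ xs, x.length ≤ b.length) → List.foldl pvMaxStep b xs = b := by
  induction xs with
  | nil => intro b h; rfl
  | cons x t ih =>
    intro b h
    rw [List.foldl_cons, pvMaxStep, if_neg (by have := h x List.mem_cons_self; omega)]
    exact ih b (fun y hy => h y (List.mem_cons_of_mem x hy))

theorem pv_fold_subs (r : List Char) (hr : r ≠ []) (b : List Char) :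
    List.foldl pvMaxStep b (pvSubs r) = pvMaxStep b r := by
  obtain ⟨R', hR⟩ : ∃ R', r.length = R' + 1 := by
    cases r; simp at hr; exact ⟨_, rfl⟩
  rw [pvSubs, hR, List.range_succ_eq_map, List.flatMap_cons, List.foldl_append]
  have h0 : List.foldl pvMaxStep b (pvPrefs (List.drop 0 r) (R' + 1 - 0)) = pvMaxStep b r := by
    rw [List.drop_zero, Nat.sub_zero, ← hR, pv_fold_prefs r r.length (le_refl _) b,
      List.take_of_length_le (le_refl _), pvMaxStep]
  rw [h0]
  apply pv_fold_noop
  intro x hx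
  rw [List.mem_flatMap] at hx
  obtain ⟨k, hk, hxk⟩ := hx
  rw [List.mem_map] at hk
  obtain ⟨j, hj, rfl⟩ := hk
  rw [List.mem_range] at hj
  rw [pvPrefs, List.mem_map] at hxk
  obtain ⟨m, hm, rfl⟩ := hxk
  rw [List.mem_range] at hm
  have hxlen : ((r.drop (j + 1)).take (m + 1)).length ≤ R' := by
    rw [List.length_take, List.length_drop]
    omega
  have hblen : r.length ≤ (pvMaxStep b r).length := by
    rw [pvMaxStep]
    by_cases hb : b.length < r.length
    · rw [if_pos hb]
    · rw [if_neg hb]; omega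
  simp only [Nat.succ_eq_add_one]
  omega

theorem pv_fold_flat (rs : List (List Char)) : ∀ (b : List Char),
    (∀ r ∈ rs, r ≠ []) → List.foldl pvMaxStep b (rs.flatMap pvSubs) = List.foldl pvMaxStep b rs := by
  induction rs with
  | nil => intro b h; rfl
  | cons r t ih =>
    intro b h
    rw [List.flatMap_cons, List.foldl_append, pv_fold_subs r (h r List.mem_cons_self) b,
      List.foldl_cons]
    exact ih _ (fun y hy => h y (List.mem_cons_of_mem r hy))

theorem pv_foldF (F : Option (List Char) → List Char → Option (List Char))
    (hsome : ∀ b x, F (some b) x = some (pvMaxStep b x)) :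
    ∀ (t : List (List Char)) (b : List Char),
      List.foldl F (some b) t = some (List.foldl pvMaxStep b t) := by
  intro t
  induction t with
  | nil => intro b; rfl
  | cons x t ih => intro b; rw [List.foldl_cons, hsome, List.foldl_cons, ih]

theorem pv_max?_eq (xs : List (List Char)) (hne : xs ≠ []) (h : ∀ x ∈ xs, x ≠ []) :
    PySem.List.max? xs PySem.Chars.len = some (List.foldl pvMaxStep [] xs) := by
  obtain ⟨y, t, rfl⟩ : ∃ y t, xs = y :: t := by
    cases xs; simp at hne; exact ⟨_, _, rfl⟩
  simp only [PySem.List.max?, List.foldl_cons]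
  have h0 : pvMaxStep [] y = y := by
    rw [pvMaxStep, if_pos]
    have hy := h y List.mem_cons_self
    cases y; simp at hy; simp
  rw [h0]
  refine pv_foldF _ ?_ t y
  intro b x
  show (if PySem.Chars.len b < PySem.Chars.len x then some x else some b) = some (pvMaxStep b x)
  rw [pvMaxStep]
  have hlen : ∀ z : List Char, PySem.Chars.len z = (z.length : Int) := by
    intro z; simp [PySem.Chars.len]
  rw [hlen, hlen]
  by_cases hc : b.length < x.length
  · rw [if_pos hc, if_pos (by exact_mod_cast hc)]
  · rw [if_neg hc, if_neg (by exact_mod_cast hc)]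

theorem pv_data_elem_ne_nil (l : List Char) : ∀ x ∈ pvData l, x ≠ [] := by
  intro x hx
  rw [pvData, List.mem_flatMap] at hx
  obtain ⟨i, _, hxi⟩ := hx
  rw [pvContrib] at hxi
  by_cases h : PySem.Chars.isdigit (l[i]?.getD ' ')
  · rw [if_pos h, pvPrefs, List.mem_map] at hxi
    obtain ⟨m, hm, rfl⟩ := hxi
    rw [List.mem_range] at hm
    have := pv_li_le (l.drop i)
    intro hemp
    have : ((l.drop i).take (m + 1)).length = 0 := by rw [hemp]; rfl
    rw [List.length_take] at this
    omega
  · rw [if_neg h] at hxi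
    simp at hxi

theorem pv_data_ne_nil (l : List Char) (h : pvRuns l ≠ []) : pvData l ≠ [] := by
  rw [pv_data_eq]
  obtain ⟨r, rs, hr⟩ : ∃ r rs, pvRuns l = r :: rs := by
    cases hc : pvRuns l; exact absurd hc h; exact ⟨_, _, rfl⟩
  have hrne : r ≠ [] := pv_runs_ne_nil l r (by rw [hr]; exact List.mem_cons_self)
  obtain ⟨R', hR⟩ : ∃ R', r.length = R' + 1 := by
    cases r; simp at hrne; exact ⟨_, rfl⟩
  rw [hr, List.flatMap_cons]
  apply List.append_ne_nil_of_left_ne_nil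
  rw [pvSubs, hR, List.range_succ_eq_map, List.flatMap_cons]
  apply List.append_ne_nil_of_left_ne_nil
  rw [pvPrefs]
  simp

-- ===== VERDICT (by name: the statement is the Claim_ definition above) =====
theorem longgestNumber_spec : Claim_equal_longgestNumber := by
  intro st _
  unfold Spec_longgestNumber
  show longgestNumber st = longgestNumber_alt st
  simp only [longgestNumber, longgestNumber_alt]
  rw [pv_outerA st.toList]
  obtain ⟨cur, hB⟩ := pv_foldB_runs st.toList [] false
  rw [hB]
  simp only []
  rw [pv_rall]
  by_cases hall : st.toList.all (fun c => !PySem.Chars.isdigit c) = true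
  · rw [if_pos hall]
    have hruns : pvRuns st.toList = [] := (pv_runs_nil_iff st.toList).mpr hall
    rw [hruns]
    simp
  · rw [if_neg hall]
    have hruns : pvRuns st.toList ≠ [] := fun hc => hall ((pv_runs_nil_iff st.toList).mp hc)
    have hflag : (false || !(pvRuns st.toList).isEmpty) = true := by
      cases hc : pvRuns st.toList
      · exact absurd hc hruns
      · simp
    rw [pv_max?_eq (pvData st.toList) (pv_data_ne_nil _ hruns) (pv_data_elem_ne_nil _)]
    rw [pv_data_eq, pv_fold_flat _ _ (pv_runs_ne_nil _)]
    rw [hflag]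
    simp
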